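-- pv_equiv track=rewrite | github.com/zrrraa/ChatClone | dataset/csv2json_sharegpt.py | split_long_dialog
-- ===== SOURCE A (Python) =====
-- def split_long_dialog(dialog, max_rounds=5):
--     """对超过指定轮数的对话进行对半拆分"""
--     max_messages = max_rounds * 2
--     if len(dialog) <= max_messages:
--         return [dialog]
--
--     mid_point = len(dialog) // 2
--     if mid_point % 2 != 0:
--         mid_point -= 1
--         if mid_point <= 0:
--             mid_point = 2
--
--     first_half = dialog[:mid_point]
--     second_half = dialog[mid_point:]
--
--     result = []
--     result.extend(split_long_dialog(first_half, max_rounds))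
--     result.extend(split_long_dialog(second_half, max_rounds))
--     return result
-- ===== SOURCE B (Python) =====
-- def split_long_dialog(dialog, max_rounds=5):
--     """Two-stage version: compute the chunk lengths arithmetically first,
--     then cut the dialog once, left to right, by those lengths."""
--     def chunk_sizes(n):
--         if n <= max_rounds * 2:
--             return [n]
--         half = n // 2
--         m = max(2, half - half % 2)
--         return chunk_sizes(m) + chunk_sizes(n - m)
--     out = []
--     rest = dialog
--     for size in chunk_sizes(len(dialog)):
--         out.append(rest[:size])
--         rest = rest[size:]
--     return out
-- ===== Notes on version B (the rewrite author's own statement) =====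
-- stated objective: alternative
-- what changed: B first computes the list of chunk lengths by a recursion over integers only (with the midpoint expressed as max(2, half - half%2)), then cuts the dialog once left-to-right by those lengths, instead of A's binary recursion that slices and concatenates lists at every level.
import Mathlib
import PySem

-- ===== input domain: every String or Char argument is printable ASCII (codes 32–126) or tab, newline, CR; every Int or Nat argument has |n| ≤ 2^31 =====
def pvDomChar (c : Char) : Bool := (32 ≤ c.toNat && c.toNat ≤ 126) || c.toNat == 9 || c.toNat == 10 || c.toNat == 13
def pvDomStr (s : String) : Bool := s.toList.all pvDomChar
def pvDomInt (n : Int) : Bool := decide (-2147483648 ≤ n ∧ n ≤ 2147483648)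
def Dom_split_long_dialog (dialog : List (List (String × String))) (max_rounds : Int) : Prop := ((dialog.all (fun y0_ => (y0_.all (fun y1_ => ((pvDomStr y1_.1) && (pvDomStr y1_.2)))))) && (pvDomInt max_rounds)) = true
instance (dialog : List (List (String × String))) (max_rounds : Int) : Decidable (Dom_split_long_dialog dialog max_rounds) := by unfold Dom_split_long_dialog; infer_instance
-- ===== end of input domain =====

-- B computes the chunk lengths by an integer-only recursion and then cuts the dialog once by those lengths, instead of A's list-slicing binary recursion (objective: alternative).


-- ===== PORT A =====
-- Fuel makes the recursion total; fuel = dialog.length + 1 bounds the recursion depth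
-- on every input admitted by Pre_ (each half is strictly shorter), so the port is exact there.
def splitRecA (fuel : Nat) (dialog : List (List (String × String))) (max_rounds : Int) :
    List (List (List (String × String))) :=
  match fuel with
  | 0 => [dialog]
  | fuel + 1 =>
    let max_messages := max_rounds * 2
    if (dialog.length : Int) ≤ max_messages then [dialog]
    else
      let mid_point0 := PySem.Int.floordiv (dialog.length : Int) 2
      let mid_point :=
        if PySem.Int.mod mid_point0 2 ≠ 0 then
          (if mid_point0 - 1 ≤ 0 then 2 else mid_point0 - 1)
        else mid_point0
      let first_half := PySem.List.slice dialog none (some mid_point)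
      let second_half := PySem.List.slice dialog (some mid_point) none
      splitRecA fuel first_half max_rounds ++ splitRecA fuel second_half max_rounds

def split_long_dialog (dialog : List (List (String × String))) (max_rounds : Int) : List (List (List (String × String))) :=
  splitRecA (dialog.length + 1) dialog max_rounds

-- ===== PORT B =====
-- B stage 1: Source B's chunk_sizes, a recursion over integers only; fuel bounds the depth
-- (each side is strictly smaller on every input admitted by Pre_), so the port is exact there.
def chunkSizes (fuel : Nat) (n : Int) (max_rounds : Int) : List Int :=
  match fuel with
  | 0 => [n]
  | fuel + 1 =>
    if n ≤ max_rounds * 2 then [n]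
    else
      let half := PySem.Int.floordiv n 2
      let m := max 2 (half - PySem.Int.mod half 2)
      chunkSizes fuel m max_rounds ++ chunkSizes fuel (n - m) max_rounds

-- B stage 2: the for-loop over the sizes, cutting `rest` left to right.
def split_long_dialog_alt (dialog : List (List (String × String))) (max_rounds : Int) : List (List (List (String × String))) :=
  ((chunkSizes (dialog.length + 1) (dialog.length : Int) max_rounds).foldl
    (fun (st : List (List (List (String × String))) × List (List (String × String))) size =>
      (st.1 ++ [PySem.List.slice st.2 none (some size)], PySem.List.slice st.2 (some size) none))
    ([], dialog)).1

-- ===== PRECONDITION & SPEC =====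
-- Pre_ excludes exactly the inputs on which Python A never returns (infinite recursion):
-- max_rounds ≤ 0 with a dialog longer than max_rounds*2 keeps splitting without shrinking.
def Pre_split_long_dialog (dialog : List (List (String × String))) (max_rounds : Int) : Prop :=
  1 ≤ max_rounds ∨ (dialog.length : Int) ≤ max_rounds * 2
instance (dialog : List (List (String × String))) (max_rounds : Int) : Decidable (Pre_split_long_dialog dialog max_rounds) := by unfold Pre_split_long_dialog; infer_instance
def pvWitness_split_long_dialog : (List (List (String × String))) × Int := ([[("human", "hi")], [("gpt", "hello")], [("human", "ok")]], 1)

def Spec_split_long_dialog (dialog : List (List (String × String))) (max_rounds : Int) (out : List (List (List (String × String)))) : Prop := out = split_long_dialog_alt dialog max_rounds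
instance (dialog : List (List (String × String))) (max_rounds : Int) (out : List (List (List (String × String)))) : Decidable (Spec_split_long_dialog dialog max_rounds out) := by unfold Spec_split_long_dialog; infer_instance

-- ===== CLAIM (what is proved, stated in full; the proofs are below) =====
def Claim_equal_split_long_dialog : Prop := ∀ (dialog : List (List (String × String))) (max_rounds : Int), Dom_split_long_dialog dialog max_rounds → Pre_split_long_dialog dialog max_rounds → Spec_split_long_dialog dialog max_rounds (split_long_dialog dialog max_rounds)

-- ===== LEMMAS AND PROOFS =====

-- A's midpoint, computed on the Nat side
def natMid (n : Nat) : Nat :=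
  if n / 2 % 2 ≠ 0 then (if n / 2 = 1 then 2 else n / 2 - 1) else n / 2

lemma midA_eq_natMid (n : Nat) :
    (if PySem.Int.mod (PySem.Int.floordiv (n : Int) 2) 2 ≠ 0 then
      (if PySem.Int.floordiv (n : Int) 2 - 1 ≤ 0 then 2 else PySem.Int.floordiv (n : Int) 2 - 1)
    else PySem.Int.floordiv (n : Int) 2) = (natMid n : Int) := by
  have h1 : PySem.Int.floordiv (n : Int) 2 = ((n / 2 : Nat) : Int) := PySem.Int.floordiv_natCast n 2
  have h2 : PySem.Int.mod ((n / 2 : Nat) : Int) 2 = (((n / 2) % 2 : Nat) : Int) := PySem.Int.mod_natCast (n / 2) 2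
  rw [h1, h2]
  unfold natMid
  by_cases hm : (n / 2) % 2 = 0
  · simp [hm]
  · simp only [hm, if_true, ne_eq, Nat.cast_eq_zero, not_false_eq_true, if_true]
    by_cases h1 : n / 2 = 1
    · simp [h1]
    · simp [h1]; omega

-- B's midpoint expression equals A's, for the sizes the recursions actually reach (n ≥ 3)
lemma midB_eq_natMid (n : Nat) (hn : 3 ≤ n) :
    max 2 (PySem.Int.floordiv (n : Int) 2 - PySem.Int.mod (PySem.Int.floordiv (n : Int) 2) 2)
      = (natMid n : Int) := by
  have h1 : PySem.Int.floordiv (n : Int) 2 = ((n / 2 : Nat) : Int) := PySem.Int.floordiv_natCast n 2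
  have h2 : PySem.Int.mod ((n / 2 : Nat) : Int) 2 = (((n / 2) % 2 : Nat) : Int) := PySem.Int.mod_natCast (n / 2) 2
  rw [h1, h2]
  unfold natMid
  split_ifs
  all_goals omega

lemma natMid_bounds (n : Nat) (hn : 3 ≤ n) : 1 ≤ natMid n ∧ natMid n < n := by
  unfold natMid; split_ifs <;> omega

lemma splitRecA_fuel_irrel (n : Nat) :
    ∀ (d : List (List (String × String))) (f g : Nat) (m : Int),
      d.length = n → 1 ≤ m → n < f → n < g → splitRecA f d m = splitRecA g d m := by
  induction n using Nat.strong_induction_on with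
  | _ n ih =>
    intro d f g m hlen hm hf hg
    subst hlen
    match f, g with
    | f + 1, g + 1 =>
      rw [splitRecA, splitRecA]
      by_cases hleaf : (d.length : Int) ≤ m * 2
      · simp [hleaf]
      · simp only [hleaf, if_false]
        rw [midA_eq_natMid d.length, PySem.List.slice_to_natCast, PySem.List.slice_from_natCast]
        have hn3 : 3 ≤ d.length := by
          have : (2 : Int) ≤ m * 2 := by nlinarith
          omega
        obtain ⟨h1, h2⟩ := natMid_bounds d.length hn3
        have hta : (d.take (natMid d.length)).length = natMid d.length := by simp; omega
        have htb : (d.drop (natMid d.length)).length = d.length - natMid d.length := by simp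
        rw [ih (d.take (natMid d.length)).length (by omega) _ f g m rfl hm (by omega) (by omega),
            ih (d.drop (natMid d.length)).length (by omega) _ f g m rfl hm (by omega) (by omega)]

lemma chunkSizes_fuel_irrel (n : Nat) :
    ∀ (f g : Nat) (m : Int), 1 ≤ m → n < f → n < g →
      chunkSizes f (n : Int) m = chunkSizes g (n : Int) m := by
  induction n using Nat.strong_induction_on with
  | _ n ih =>
    intro f g m hm hf hg
    match f, g with
    | f + 1, g + 1 =>
      rw [chunkSizes, chunkSizes]
      by_cases hleaf : (n : Int) ≤ m * 2
      · simp [hleaf]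
      · simp only [hleaf, if_false]
        rw [midB_eq_natMid n (by
          have : (2 : Int) ≤ m * 2 := by nlinarith
          omega)]
        have hn3 : 3 ≤ n := by
          have : (2 : Int) ≤ m * 2 := by nlinarith
          omega
        obtain ⟨h1, h2⟩ := natMid_bounds n hn3
        have hsub : (n : Int) - (natMid n : Int) = ((n - natMid n : Nat) : Int) := by omega
        rw [hsub, ih (natMid n) (by omega) f g m hm (by omega) (by omega),
            ih (n - natMid n) (by omega) f g m hm (by omega) (by omega)]

-- the B fold, named, to reason about it
def cutFold (sizes : List Int)
    (st : List (List (List (String × String))) × List (List (String × String))) :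
    List (List (List (String × String))) × List (List (String × String)) :=
  sizes.foldl
    (fun st size =>
      (st.1 ++ [PySem.List.slice st.2 none (some size)], PySem.List.slice st.2 (some size) none))
    st

lemma cutFold_append (s1 s2 : List Int) (st) :
    cutFold (s1 ++ s2) st = cutFold s2 (cutFold s1 st) := by
  unfold cutFold; rw [List.foldl_append]

-- main invariant: cutting d ++ q by d's chunk sizes yields A's chunks of d, leaving q
lemma cut_chunkSizes (n : Nat) :
    ∀ (d : List (List (String × String))) (q : List (List (String × String)))
      (acc : List (List (List (String × String)))) (m : Int),
      d.length = n → 1 ≤ m →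
      cutFold (chunkSizes (n + 1) (n : Int) m) (acc, d ++ q)
        = (acc ++ splitRecA (n + 1) d m, q) := by
  induction n using Nat.strong_induction_on with
  | _ n ih =>
    intro d q acc m hlen hm
    subst hlen
    rw [chunkSizes, splitRecA]
    by_cases hleaf : (d.length : Int) ≤ m * 2
    · simp only [hleaf, if_true]
      unfold cutFold
      simp only [List.foldl_cons, List.foldl_nil]
      rw [PySem.List.slice_to_natCast, PySem.List.slice_from_natCast]
      simp
    · simp only [hleaf, if_false]
      have hn3 : 3 ≤ d.length := by
        have : (2 : Int) ≤ m * 2 := by nlinarith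
        omega
      rw [midA_eq_natMid d.length, midB_eq_natMid d.length hn3,
          PySem.List.slice_to_natCast, PySem.List.slice_from_natCast]
      obtain ⟨h1, h2⟩ := natMid_bounds d.length hn3
      set k := natMid d.length with hk
      have hta : (d.take k).length = k := by simp; omega
      have htb : (d.drop k).length = d.length - k := by simp
      have hsub : (d.length : Int) - (k : Int) = ((d.length - k : Nat) : Int) := by omega
      rw [hsub,
          chunkSizes_fuel_irrel k d.length (k + 1) m hm (by omega) (by omega),
          chunkSizes_fuel_irrel (d.length - k) d.length ((d.length - k) + 1) m hm (by omega) (by omega),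
          cutFold_append]
      have hdq : d ++ q = d.take k ++ (d.drop k ++ q) := by
        rw [← List.append_assoc, List.take_append_drop]
      rw [hdq,
          ih k (by omega) (d.take k) (d.drop k ++ q) acc m hta hm]
      rw [ih (d.length - k) (by omega) (d.drop k) q (acc ++ splitRecA (k + 1) (d.take k) m) m htb hm]
      rw [splitRecA_fuel_irrel (d.take k).length (d.take k) (d.length) (k + 1) m rfl hm (by omega) (by omega),
          splitRecA_fuel_irrel (d.drop k).length (d.drop k) (d.length) ((d.length - k) + 1) m rfl hm (by omega) (by omega)]
      simp

-- ===== VERDICT (by name: the statement is the Claim_ definition above) =====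
theorem split_long_dialog_spec : Claim_equal_split_long_dialog := by
  intro dialog m _ hpre
  unfold Spec_split_long_dialog split_long_dialog split_long_dialog_alt
  by_cases hm : 1 ≤ m
  · have := cut_chunkSizes dialog.length dialog [] [] m rfl hm
    simp only [List.append_nil] at this
    rw [show (chunkSizes (dialog.length + 1) (dialog.length : Int) m).foldl
          (fun (st : List (List (List (String × String))) × List (List (String × String))) size =>
            (st.1 ++ [PySem.List.slice st.2 none (some size)], PySem.List.slice st.2 (some size) none))
          ([], dialog)
        = cutFold (chunkSizes (dialog.length + 1) (dialog.length : Int) m) ([], dialog) from rfl]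
    rw [this]
    simp
  · rcases hpre with h | h
    · exact absurd h hm
    · have hd : dialog = [] := by
        have hm2 : m * 2 ≤ 0 := by nlinarith
        have : dialog.length = 0 := by omega
        exact List.length_eq_zero_iff.mp this
      subst hd
      have h' : (0 : Int) ≤ m * 2 := by simpa using h
      simp [splitRecA, chunkSizes, PySem.List.slice, h']
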